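-- pv_equiv track=rewrite | github.com/a-hananop/Hanan-Math-Studio | math_expert_gui.py | detect_concept_fallback
-- ===== SOURCE A (Python) =====
-- def detect_concept_fallback(words):
--     """Enhanced concept detection without Prolog"""
--     concepts = {
--         'derivative': ['derivative', 'differentiate', 'rate', 'change', 'slope', 'tangent', 'gradient'],
--         'integration': ['integral', 'integrate', 'area', 'antiderivative', 'accumulation'],
--         'limit': ['limit', 'approach', 'tends', 'converge', 'infinity'],
--         'partial_derivative': ['partial', 'multivariable'],
--         'dot_product': ['dot', 'scalar', 'inner'],
--         'cross_product': ['cross', 'vector', 'perpendicular', 'orthogonal'],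
--         'modulus': ['modulus', 'magnitude', 'length', 'norm'],
--         'mean': ['mean', 'average', 'central'],
--         'median': ['median', 'middle'],
--         'mode': ['mode', 'frequent', 'common'],
--         'variance': ['variance', 'spread', 'dispersion'],
--         'standard_deviation': ['standard', 'deviation', 'variability'],
--         'range': ['range', 'span'],
--         'percentile': ['percentile', 'quantile'],
--         'correlation': ['correlation', 'relationship', 'covariance'],
--         'regression': ['regression', 'predict', 'trend'],
--         'floor_function': ['floor'],
--         'ceiling_function': ['ceiling', 'ceil'],
--         'absolute_value': ['absolute', 'abs', 'modulus'],
--         'quadratic_equation': ['quadratic', 'square', 'roots', 'parabola'],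
--         'linear_equation': ['linear', 'solve', 'straight'],
--         'cubic_equation': ['cubic', 'third', 'degree'],
--         'polynomial': ['polynomial'],
--         'logarithm': ['log', 'logarithm', 'ln', 'natural'],
--         'exponential': ['exponential', 'exp', 'growth', 'decay'],
--         'trigonometry_sin': ['sin', 'sine'],
--         'trigonometry_cos': ['cos', 'cosine'],
--         'trigonometry_tan': ['tan', 'tangent'],
--         'probability': ['probability', 'chance', 'likely', 'odds'],
--         'permutation': ['permutation', 'arrangement', 'order'],
--         'combination': ['combination', 'choose', 'selection'],
--         'factorial': ['factorial'],
--         'gcd': ['gcd', 'greatest', 'common', 'divisor'],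
--         'lcm': ['lcm', 'least', 'common', 'multiple'],
--         'prime': ['prime', 'factor'],
--         'matrix_multiplication': ['matrix', 'multiply'],
--         'matrix_determinant': ['determinant'],
--         'matrix_inverse': ['inverse'],
--         'eigenvalue': ['eigenvalue', 'eigenvector'],
--         'fourier': ['fourier', 'transform', 'frequency'],
--         'laplace': ['laplace', 'transform'],
--         'convolution': ['convolution', 'convolve']
--     }
--
--     # Score each concept
--     concept_scores = {}
--     for concept, keywords in concepts.items():
--         score = sum(1 for word in words if word in keywords)
--         if score > 0:
--             concept_scores[concept] = score
--
--     # Return concept with highest score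
--     if concept_scores:
--         return max(concept_scores.items(), key=lambda x: x[1])[0]
--
--     return None
-- ===== SOURCE B (Python) =====
-- # Concept table kept as compact "concept kw1 kw2 ..." records, parsed on the fly.
-- _TABLE = [
--     "derivative derivative differentiate rate change slope tangent gradient",
--     "integration integral integrate area antiderivative accumulation",
--     "limit limit approach tends converge infinity",
--     "partial_derivative partial multivariable",
--     "dot_product dot scalar inner",
--     "cross_product cross vector perpendicular orthogonal",
--     "modulus modulus magnitude length norm",
--     "mean mean average central",
--     "median median middle",
--     "mode mode frequent common",
--     "variance variance spread dispersion",
--     "standard_deviation standard deviation variability",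
--     "range range span",
--     "percentile percentile quantile",
--     "correlation correlation relationship covariance",
--     "regression regression predict trend",
--     "floor_function floor",
--     "ceiling_function ceiling ceil",
--     "absolute_value absolute abs modulus",
--     "quadratic_equation quadratic square roots parabola",
--     "linear_equation linear solve straight",
--     "cubic_equation cubic third degree",
--     "polynomial polynomial",
--     "logarithm log logarithm ln natural",
--     "exponential exponential exp growth decay",
--     "trigonometry_sin sin sine",
--     "trigonometry_cos cos cosine",
--     "trigonometry_tan tan tangent",
--     "probability probability chance likely odds",
--     "permutation permutation arrangement order",
--     "combination combination choose selection",
--     "factorial factorial",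
--     "gcd gcd greatest common divisor",
--     "lcm lcm least common multiple",
--     "prime prime factor",
--     "matrix_multiplication matrix multiply",
--     "matrix_determinant determinant",
--     "matrix_inverse inverse",
--     "eigenvalue eigenvalue eigenvector",
--     "fourier fourier transform frequency",
--     "laplace laplace transform",
--     "convolution convolution convolve",
-- ]
--
--
-- def detect_concept_fallback(words):
--     """Enhanced concept detection without Prolog"""
--     # One pass over the words: a multiplicity table, so no concept re-scans the list.
--     counts = {}
--     for w in words:
--         counts[w] = counts.get(w, 0) + 1
--
--     # One pass over the table records: score = sum of keyword counts; the running
--     # strict '>' keeps the earliest record on ties and leaves None when all are zero.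
--     best, best_score = None, 0
--     for entry in _TABLE:
--         concept, *keywords = entry.split()
--         score = sum(counts.get(k, 0) for k in keywords)
--         if score > best_score:
--             best, best_score = concept, score
--     return best
-- ===== Notes on version B (the rewrite author's own statement) =====
-- stated objective: faster
-- what changed: B stores the concept data as compact 'concept kw1 kw2 ...' records parsed on the fly, replaces A's per-concept rescan of the word list with a single word-count dict built in one pass, and selects the winner with a running strict-max over the record order instead of building a score dict and calling max().
import Mathlib
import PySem

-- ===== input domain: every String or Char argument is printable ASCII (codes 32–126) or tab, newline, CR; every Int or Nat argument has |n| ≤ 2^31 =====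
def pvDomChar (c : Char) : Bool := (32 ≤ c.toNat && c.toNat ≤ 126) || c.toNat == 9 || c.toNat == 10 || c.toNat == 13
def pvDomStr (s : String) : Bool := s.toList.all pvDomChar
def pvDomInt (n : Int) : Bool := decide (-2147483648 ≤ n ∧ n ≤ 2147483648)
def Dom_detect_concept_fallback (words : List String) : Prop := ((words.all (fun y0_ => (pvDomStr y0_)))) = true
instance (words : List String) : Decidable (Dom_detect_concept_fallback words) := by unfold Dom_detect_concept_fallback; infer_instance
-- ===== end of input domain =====

-- B stores the concept data as compact records parsed on the fly, counts the words
-- once instead of A's per-concept rescans, and picks the winner with a running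
-- strict-max over the record order (same value, O(n + K) vs O(n*K)).

-- ===== PORT A =====
def conceptsA : List (String × List String) := [
  ("derivative", ["derivative", "differentiate", "rate", "change", "slope", "tangent", "gradient"]),
  ("integration", ["integral", "integrate", "area", "antiderivative", "accumulation"]),
  ("limit", ["limit", "approach", "tends", "converge", "infinity"]),
  ("partial_derivative", ["partial", "multivariable"]),
  ("dot_product", ["dot", "scalar", "inner"]),
  ("cross_product", ["cross", "vector", "perpendicular", "orthogonal"]),
  ("modulus", ["modulus", "magnitude", "length", "norm"]),
  ("mean", ["mean", "average", "central"]),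
  ("median", ["median", "middle"]),
  ("mode", ["mode", "frequent", "common"]),
  ("variance", ["variance", "spread", "dispersion"]),
  ("standard_deviation", ["standard", "deviation", "variability"]),
  ("range", ["range", "span"]),
  ("percentile", ["percentile", "quantile"]),
  ("correlation", ["correlation", "relationship", "covariance"]),
  ("regression", ["regression", "predict", "trend"]),
  ("floor_function", ["floor"]),
  ("ceiling_function", ["ceiling", "ceil"]),
  ("absolute_value", ["absolute", "abs", "modulus"]),
  ("quadratic_equation", ["quadratic", "square", "roots", "parabola"]),
  ("linear_equation", ["linear", "solve", "straight"]),
  ("cubic_equation", ["cubic", "third", "degree"]),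
  ("polynomial", ["polynomial"]),
  ("logarithm", ["log", "logarithm", "ln", "natural"]),
  ("exponential", ["exponential", "exp", "growth", "decay"]),
  ("trigonometry_sin", ["sin", "sine"]),
  ("trigonometry_cos", ["cos", "cosine"]),
  ("trigonometry_tan", ["tan", "tangent"]),
  ("probability", ["probability", "chance", "likely", "odds"]),
  ("permutation", ["permutation", "arrangement", "order"]),
  ("combination", ["combination", "choose", "selection"]),
  ("factorial", ["factorial"]),
  ("gcd", ["gcd", "greatest", "common", "divisor"]),
  ("lcm", ["lcm", "least", "common", "multiple"]),
  ("prime", ["prime", "factor"]),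
  ("matrix_multiplication", ["matrix", "multiply"]),
  ("matrix_determinant", ["determinant"]),
  ("matrix_inverse", ["inverse"]),
  ("eigenvalue", ["eigenvalue", "eigenvector"]),
  ("fourier", ["fourier", "transform", "frequency"]),
  ("laplace", ["laplace", "transform"]),
  ("convolution", ["convolution", "convolve"])
]

-- Port of A: for each concept, score = number of words appearing in its keyword list;
-- positive scores go into a dict; the winner is Python max over the items by score.
def detect_concept_fallback (words : List String) : Option String :=
  let concept_scores : PySem.Dict String Int :=
    List.foldl (fun d p =>
      let score : Int := List.foldl (fun acc w => if w ∈ p.2 then acc + 1 else acc) 0 words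
      if score > 0 then d.insert p.1 score else d) PySem.Dict.empty conceptsA
  if concept_scores.items ≠ [] then
    (PySem.List.max? concept_scores.items (fun x => x.2)).map (fun x => x.1)
  else
    none

-- ===== PORT B =====
-- Source B's _TABLE: "concept kw1 kw2 ..." records
def pvTable : List String := [
  "derivative derivative differentiate rate change slope tangent gradient",
  "integration integral integrate area antiderivative accumulation",
  "limit limit approach tends converge infinity",
  "partial_derivative partial multivariable",
  "dot_product dot scalar inner",
  "cross_product cross vector perpendicular orthogonal",
  "modulus modulus magnitude length norm",
  "mean mean average central",
  "median median middle",
  "mode mode frequent common",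
  "variance variance spread dispersion",
  "standard_deviation standard deviation variability",
  "range range span",
  "percentile percentile quantile",
  "correlation correlation relationship covariance",
  "regression regression predict trend",
  "floor_function floor",
  "ceiling_function ceiling ceil",
  "absolute_value absolute abs modulus",
  "quadratic_equation quadratic square roots parabola",
  "linear_equation linear solve straight",
  "cubic_equation cubic third degree",
  "polynomial polynomial",
  "logarithm log logarithm ln natural",
  "exponential exponential exp growth decay",
  "trigonometry_sin sin sine",
  "trigonometry_cos cos cosine",
  "trigonometry_tan tan tangent",
  "probability probability chance likely odds",
  "permutation permutation arrangement order",
  "combination combination choose selection",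
  "factorial factorial",
  "gcd gcd greatest common divisor",
  "lcm lcm least common multiple",
  "prime prime factor",
  "matrix_multiplication matrix multiply",
  "matrix_determinant determinant",
  "matrix_inverse inverse",
  "eigenvalue eigenvalue eigenvector",
  "fourier fourier transform frequency",
  "laplace laplace transform",
  "convolution convolution convolve"
]

-- Port of B: count the words once; then one pass over the table records, splitting
-- each into concept :: keywords ('concept, *keywords = entry.split()'), summing the
-- counts of the keywords and keeping the first record with a strictly greater score.
def detect_concept_fallback_alt (words : List String) : Option String :=
  let counts : PySem.Dict String Int :=
    List.foldl (fun d w => d.insert w (d.getD w 0 + 1)) PySem.Dict.empty words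
  let best : Option String × Int :=
    List.foldl (fun best entry =>
      match PySem.Str.split₀ entry with
      | concept :: keywords =>
        let score : Int := List.foldl (fun acc k => acc + counts.getD k 0) 0 keywords
        if score > best.2 then (some concept, score) else best
      | [] => best) (none, 0) pvTable
  best.1

-- ===== PRECONDITION & SPEC =====
def Spec_detect_concept_fallback (words : List String) (out : Option String) : Prop := out = detect_concept_fallback_alt words
instance (words : List String) (out : Option String) : Decidable (Spec_detect_concept_fallback words out) := by unfold Spec_detect_concept_fallback; infer_instance

-- ===== CLAIM (what is proved, stated in full; the proofs are below) =====
def Claim_equal_detect_concept_fallback : Prop := ∀ (words : List String), Dom_detect_concept_fallback words → Spec_detect_concept_fallback words (detect_concept_fallback words)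

-- ===== LEMMAS AND PROOFS =====

-- B's table parses into exactly A's (concept, keywords) pairs
theorem pvParse : pvTable.map PySem.Str.split₀ = conceptsA.map (fun p => p.1 :: p.2) := by decide

-- A's per-concept score as a function (the inner fold of port A)
def pvScoreA (words : List String) (p : String × List String) : Int :=
  List.foldl (fun acc w => if w ∈ p.2 then acc + 1 else acc) 0 words

-- B's selection step on (concept, score) pairs
def pvStepB (best : Option String × Int) (q : String × Int) : Option String × Int :=
  if q.2 > best.2 then (some q.1, q.2) else best

-- Python max's running step (the fold inside PySem.List.max? with key = snd)
def pvStepM (acc : Option (String × Int)) (x : String × Int) : Option (String × Int) :=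
  match acc with
  | none => some x
  | some m => if m.2 < x.2 then some x else some m

def pvRep : Option (String × Int) → Option String × Int
  | none => (none, 0)
  | some m => (some m.1, m.2)

theorem pvKeysNodup : (conceptsA.map (fun p => p.1)).Nodup := by decide

theorem pvKwNodup : ∀ p ∈ conceptsA, p.2.Nodup := by decide

-- A's conditional-insert loop over fresh distinct keys builds exactly the filtered score list
theorem pvItemsA (sc : String × List String → Int) :
    ∀ (l : List (String × List String)) (d : PySem.Dict String Int),
      (l.map (fun p => p.1)).Nodup → (∀ p ∈ l, d.contains p.1 = false) →
      (List.foldl (fun d p => if sc p > 0 then d.insert p.1 (sc p) else d) d l).items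
        = d.items ++ (l.map (fun p => (p.1, sc p))).filter (fun q => decide (q.2 > 0)) := by
  intro l
  induction l with
  | nil => intro d _ _; simp
  | cons p t ih =>
    intro d hnd hfresh
    simp only [List.map_cons, List.nodup_cons] at hnd
    simp only [List.foldl_cons, List.map_cons, List.filter_cons]
    by_cases hs : sc p > 0
    · have hfr : d.contains p.1 = false := hfresh p (List.mem_cons_self ..)
      have ht : ∀ q ∈ t, (d.insert p.1 (sc p)).contains q.1 = false := by
        intro q hq
        rw [PySem.Dict.contains_insert]
        have hne : q.1 ≠ p.1 := by
          intro h; exact hnd.1 (h ▸ List.mem_map_of_mem hq)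
        simp [hne, hfresh q (List.mem_cons_of_mem _ hq)]
      rw [if_pos hs, ih _ hnd.2 ht, PySem.Dict.items_insert_of_not_contains _ _ hfr]
      simp [hs]
    · rw [if_neg hs, ih _ hnd.2 (fun q hq => hfresh q (List.mem_cons_of_mem _ hq))]
      simp [hs]

-- B's selection fold ignores non-positive scores once the running best is ≥ 0
theorem pvFoldBFilter :
    ∀ (l : List (String × Int)) (b : Option String) (m : Int), 0 ≤ m →
      List.foldl pvStepB (b, m) l
        = List.foldl pvStepB (b, m) (l.filter (fun q => decide (q.2 > 0))) := by
  intro l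
  induction l with
  | nil => intro b m _; rfl
  | cons q t ih =>
    intro b m hm
    simp only [List.filter_cons, List.foldl_cons]
    by_cases hq : q.2 > 0
    · simp only [hq, decide_true, if_true, List.foldl_cons]
      by_cases hqm : q.2 > m
      · simp only [pvStepB, if_pos hqm]; exact ih _ _ (le_of_lt hq)
      · simp only [pvStepB, if_neg hqm]; exact ih _ _ hm
    · have : ¬ (q.2 > m) := by omega
      simp only [hq, decide_false, pvStepB, if_neg this]
      exact ih _ _ hm

-- over positive scores B's fold simulates Python max's fold
theorem pvFoldBMax :
    ∀ (l : List (String × Int)) (acc : Option (String × Int)),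
      (∀ y ∈ l, (0:Int) < y.2) →
      List.foldl pvStepB (pvRep acc) l = pvRep (List.foldl pvStepM acc l) := by
  intro l
  induction l with
  | nil => intro acc _; rfl
  | cons q t ih =>
    intro acc hpos
    have hq : (0:Int) < q.2 := hpos q (List.mem_cons_self ..)
    have ht : ∀ y ∈ t, (0:Int) < y.2 := fun y hy => hpos y (List.mem_cons_of_mem _ hy)
    simp only [List.foldl_cons]
    cases acc with
    | none =>
      have : pvStepB (pvRep none) q = pvRep (some q) := by
        simp [pvStepB, pvRep, hq]
      rw [this, ih _ ht]; rfl
    | some m =>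
      by_cases h : m.2 < q.2
      · have : pvStepB (pvRep (some m)) q = pvRep (some q) := by
          simp [pvStepB, pvRep, h]
        rw [this, ih _ ht]
        simp [pvStepM, h]
      · have : pvStepB (pvRep (some m)) q = pvRep (some m) := by
          simp [pvStepB, pvRep, h]
        rw [this, ih _ ht]
        simp [pvStepM, h]

-- counting words in k :: ks splits off the count of k when k ∉ ks
theorem pvCountPCons (k : String) (ks : List String) (hk : k ∉ ks) :
    ∀ words : List String,
      words.countP (fun w => decide (w ∈ k :: ks))
        = words.count k + words.countP (fun w => decide (w ∈ ks)) := by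
  intro words
  induction words with
  | nil => rfl
  | cons w ws ih =>
    simp only [List.countP_cons, List.count_cons, ih]
    by_cases hw : w = k
    · have hks : w ∉ ks := hw ▸ hk
      subst hw
      simp [hks]
      omega
    · by_cases hks : w ∈ ks
      · simp [hw, hks, beq_iff_eq]
        omega
      · simp [hw, hks, beq_iff_eq]

-- sum of per-keyword counts = membership count, for duplicate-free keyword lists
theorem pvSumCounts (ks : List String) (hnd : ks.Nodup) (words : List String) :
    (List.map (fun k => ((words.count k : Int))) ks).sum
      = ((words.countP (fun w => decide (w ∈ ks)) : Int)) := by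
  induction ks with
  | nil => simp
  | cons k t ih =>
    simp only [List.nodup_cons] at hnd
    rw [List.map_cons, List.sum_cons, ih hnd.2, pvCountPCons k t hnd.1 words]
    push_cast
    ring

-- B's inner score (keyword-count sum) equals A's per-concept score
theorem pvScoreEq (words : List String) (p : String × List String) (hnd : p.2.Nodup) :
    List.foldl (fun acc k =>
        acc + (List.foldl (fun d w => d.insert w (d.getD w 0 + 1)) PySem.Dict.empty words).getD k 0)
      0 p.2 = pvScoreA words p := by
  rw [PySem.List.foldl_add]
  have hc : ∀ k : String,
      (List.foldl (fun d w => d.insert w (d.getD w 0 + 1)) PySem.Dict.empty words).getD k 0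
        = (words.count k : Int) := by
    intro k
    rw [PySem.Dict.getD_foldl_insert_add_one]
    simp [PySem.Dict.getD_empty]
  simp only [hc, zero_add]
  rw [pvSumCounts p.2 hnd words]
  unfold pvScoreA
  rw [PySem.List.foldl_ite_add_one (fun w => w ∈ p.2) words 0]
  simp

theorem pvRepFst (o : Option (String × Int)) : (pvRep o).1 = o.map (fun x => x.1) := by
  cases o <;> rfl

-- B's word-count dict (the first fold of port B) as a function
def pvCounts (words : List String) : PySem.Dict String Int :=
  List.foldl (fun d w => d.insert w (d.getD w 0 + 1)) PySem.Dict.empty words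

-- B's per-record step, on the already-split parts list
def pvStepParts (counts : PySem.Dict String Int) (best : Option String × Int)
    (parts : List String) : Option String × Int :=
  match parts with
  | concept :: keywords =>
    let score : Int := List.foldl (fun acc k => acc + counts.getD k 0) 0 keywords
    if score > best.2 then (some concept, score) else best
  | [] => best

-- ===== VERDICT (by name: the statement is the Claim_ definition above) =====
theorem detect_concept_fallback_spec : Claim_equal_detect_concept_fallback := by
  intro words _
  unfold Spec_detect_concept_fallback
  -- A's score dict holds exactly the positive (concept, score) pairs, in table order
  have hitems :
      (List.foldl (fun d p =>
          if (List.foldl (fun acc w => if w ∈ p.2 then acc + 1 else acc) (0:Int) words) > 0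
          then d.insert p.1 (List.foldl (fun acc w => if w ∈ p.2 then acc + 1 else acc) (0:Int) words)
          else d) PySem.Dict.empty conceptsA).items
        = (conceptsA.map (fun p => (p.1, pvScoreA words p))).filter (fun q => decide (q.2 > 0)) := by
    have := pvItemsA (pvScoreA words) conceptsA PySem.Dict.empty pvKeysNodup
      (by intro p _; simp [PySem.Dict.contains_empty])
    simpa [pvScoreA, PySem.Dict.empty] using this
  have hAv : detect_concept_fallback words
      = (if ((conceptsA.map (fun p => (p.1, pvScoreA words p))).filter (fun q => decide (q.2 > 0))) ≠ []
         then (PySem.List.max? ((conceptsA.map (fun p => (p.1, pvScoreA words p))).filter (fun q => decide (q.2 > 0)))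
                 (fun x => x.2)).map (fun x => x.1)
         else none) := by
    unfold detect_concept_fallback
    simp only []
    rw [hitems]
  -- B: pull the record split out of the fold, parse the table, and score each record
  have hBv : detect_concept_fallback_alt words
      = (List.foldl pvStepB ((none : Option String), (0:Int))
          (conceptsA.map (fun p => (p.1, pvScoreA words p)))).1 := by
    show (List.foldl (fun (best : Option String × Int) entry =>
        match PySem.Str.split₀ entry with
        | concept :: keywords =>
          let score : Int := List.foldl (fun acc k => acc + (pvCounts words).getD k 0) 0 keywords
          if score > best.2 then (some concept, score) else best
        | [] => best) ((none : Option String), (0:Int)) pvTable).1 = _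
    rw [show List.foldl (fun (best : Option String × Int) entry =>
        match PySem.Str.split₀ entry with
        | concept :: keywords =>
          let score : Int := List.foldl (fun acc k => acc + (pvCounts words).getD k 0) 0 keywords
          if score > best.2 then (some concept, score) else best
        | [] => best) ((none : Option String), (0:Int)) pvTable
      = (pvTable.map PySem.Str.split₀).foldl (pvStepParts (pvCounts words))
          ((none : Option String), (0:Int))
      from (List.foldl_map (f := PySem.Str.split₀) (g := pvStepParts (pvCounts words))).symm]
    rw [pvParse]
    refine congrArg Prod.fst ?_
    simp only [List.foldl_map]
    apply PySem.List.foldl_congr_mem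
    intro acc p hp
    show (if List.foldl (fun acc k => acc + (pvCounts words).getD k 0) 0 p.2 > acc.2
          then (some p.1, List.foldl (fun acc k => acc + (pvCounts words).getD k 0) 0 p.2)
          else acc)
        = (if pvScoreA words p > acc.2 then (some p.1, pvScoreA words p) else acc)
    unfold pvCounts
    rw [pvScoreEq words p (pvKwNodup p hp)]
  rw [hAv, hBv]
  set Lp := (conceptsA.map (fun p => (p.1, pvScoreA words p))).filter (fun q => decide (q.2 > 0)) with hLp
  rw [pvFoldBFilter _ none 0 le_rfl, ← hLp]
  have hpos : ∀ y ∈ Lp, (0:Int) < y.2 := by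
    intro y hy
    rw [hLp] at hy
    have := (List.mem_filter.mp hy).2
    simpa using this
  rw [show ((none : Option String), (0:Int)) = pvRep none from rfl, pvFoldBMax Lp none hpos,
    pvRepFst]
  have hmax : PySem.List.max? Lp (fun x => x.2) = List.foldl pvStepM none Lp := by
    simp only [PySem.List.max?]
    exact PySem.List.foldl_congr_mem Lp _ _ none (fun acc x _ => by cases acc <;> rfl)
  by_cases hE : Lp = []
  · simp [hE]
  · rw [if_pos hE, hmax]
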